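-- pv_equiv track=rewrite | github.com/CaptainMcGee/GeneralsAP | scripts/archipelago_generate_ini.py | split_non_building_members
-- ===== SOURCE A (Python) =====
-- def split_non_building_members(templates: list[str]) -> tuple[list[str], list[str], list[str]]:
--     units: list[str] = []
--     upgrades: list[str] = []
--     commands: list[str] = []
--     for name in templates:
--         if not name or not name.strip():
--             continue
--         if name.startswith("Upgrade_"):
--             upgrades.append(name)
--         elif name.startswith("Command_"):
--             commands.append(name)
--         else:
--             units.append(name)
--     return (units, upgrades, commands)
-- ===== SOURCE B (Python) =====
-- def split_non_building_members(templates: list[str]) -> tuple[list[str], list[str], list[str]]: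
--     units = [n for n in templates if n.strip()
--              and not n.startswith("Upgrade_") and not n.startswith("Command_")]
--     upgrades = [n for n in templates if n.strip() and n.startswith("Upgrade_")]
--     commands = [n for n in templates if n.strip() and n.startswith("Command_")]
--     return (units, upgrades, commands)
-- ===== Notes on version B (the rewrite author's own statement) =====
-- stated objective: alternative
-- what changed: Replaces the single branching accumulator loop with three independent filter passes (list comprehensions), one per category.
import Mathlib
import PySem

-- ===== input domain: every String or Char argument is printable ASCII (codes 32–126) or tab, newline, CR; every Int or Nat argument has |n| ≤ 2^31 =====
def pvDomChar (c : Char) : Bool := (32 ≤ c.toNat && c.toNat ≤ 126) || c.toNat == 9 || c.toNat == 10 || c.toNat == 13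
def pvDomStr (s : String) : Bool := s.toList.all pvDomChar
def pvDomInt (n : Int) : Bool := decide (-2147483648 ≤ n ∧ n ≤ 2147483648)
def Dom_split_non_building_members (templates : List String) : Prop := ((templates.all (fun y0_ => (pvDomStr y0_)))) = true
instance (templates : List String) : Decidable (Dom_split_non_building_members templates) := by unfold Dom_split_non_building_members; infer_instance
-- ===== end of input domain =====

-- B replaces A's single branching accumulator loop with three independent filter passes (same cost, different decomposition).

-- ===== PORT A =====
def split_non_building_members (templates : List String) : List String × List String × List String :=
  templates.foldl
    (fun acc name =>
      if name = "" ∨ PySem.Str.strip name = "" then acc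
      else if PySem.Str.startswith name "Upgrade_" then (acc.1, acc.2.1 ++ [name], acc.2.2)
      else if PySem.Str.startswith name "Command_" then (acc.1, acc.2.1, acc.2.2 ++ [name])
      else (acc.1 ++ [name], acc.2.1, acc.2.2))
    ([], [], [])

-- ===== PORT B =====
def split_non_building_members_alt (templates : List String) : List String × List String × List String :=
  (templates.filter (fun n => !(PySem.Str.strip n == "") && !(PySem.Str.startswith n "Upgrade_") && !(PySem.Str.startswith n "Command_")),
   templates.filter (fun n => !(PySem.Str.strip n == "") && PySem.Str.startswith n "Upgrade_"),
   templates.filter (fun n => !(PySem.Str.strip n == "") && PySem.Str.startswith n "Command_"))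

-- ===== PRECONDITION & SPEC =====
def Spec_split_non_building_members (templates : List String) (out : List String × List String × List String) : Prop := out = split_non_building_members_alt templates
instance (templates : List String) (out : List String × List String × List String) : Decidable (Spec_split_non_building_members templates out) := by unfold Spec_split_non_building_members; infer_instance

-- ===== CLAIM (what is proved, stated in full; the proofs are below) =====
def Claim_equal_split_non_building_members : Prop := ∀ (templates : List String), Dom_split_non_building_members templates → Spec_split_non_building_members templates (split_non_building_members templates)

-- ===== LEMMAS AND PROOFS =====

lemma snbm_foldl_acc (ts : List String) (u g c : List String) :
    ts.foldl
      (fun acc name =>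
        if name = "" ∨ PySem.Str.strip name = "" then acc
        else if PySem.Str.startswith name "Upgrade_" then (acc.1, acc.2.1 ++ [name], acc.2.2)
        else if PySem.Str.startswith name "Command_" then (acc.1, acc.2.1, acc.2.2 ++ [name])
        else (acc.1 ++ [name], acc.2.1, acc.2.2))
      (u, g, c)
    = (u ++ ts.filter (fun n => !(PySem.Str.strip n == "") && !(PySem.Str.startswith n "Upgrade_") && !(PySem.Str.startswith n "Command_")),
       g ++ ts.filter (fun n => !(PySem.Str.strip n == "") && PySem.Str.startswith n "Upgrade_"),
       c ++ ts.filter (fun n => !(PySem.Str.strip n == "") && PySem.Str.startswith n "Command_")) := by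
  induction ts generalizing u g c with
  | nil => simp
  | cons n ts ih =>
    have hblank : (n = "" ∨ PySem.Str.strip n = "") ↔ PySem.Str.strip n = "" := by
      constructor
      · rintro (rfl | h) <;> first | rfl | exact h
      · exact Or.inr
    simp only [List.foldl_cons, List.filter_cons]
    by_cases hb : PySem.Str.strip n = ""
    · simpa [hblank, hb] using ih u g c
    · have hn : n ≠ "" := fun h => hb (by rw [h]; decide)
      by_cases hu : PySem.Chars.startswith n.toList ['U','p','g','r','a','d','e','_'] = true
      · have hc' : PySem.Chars.startswith n.toList ['C','o','m','m','a','n','d','_'] = false := by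
          rw [PySem.Chars.startswith_iff] at hu
          by_contra h
          rw [Bool.not_eq_false, PySem.Chars.startswith_iff] at h
          obtain ⟨t1, h1⟩ := hu
          obtain ⟨t2, h2⟩ := h
          rw [← h1] at h2
          simp at h2
        simpa [hblank, hb, hn, hu, hc', List.append_assoc] using ih u (g ++ [n]) c
      · by_cases hc : PySem.Chars.startswith n.toList ['C','o','m','m','a','n','d','_'] = true
        · simpa [hblank, hb, hn, hu, hc, List.append_assoc] using ih u g (c ++ [n])
        · simpa [hblank, hb, hn, hu, hc, List.append_assoc] using ih (u ++ [n]) g c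

-- ===== VERDICT (by name: the statement is the Claim_ definition above) =====
theorem split_non_building_members_spec : Claim_equal_split_non_building_members := by
  intro templates _
  show _ = _
  unfold split_non_building_members split_non_building_members_alt
  have h := snbm_foldl_acc templates [] [] []
  simp only [List.nil_append] at h
  exact h
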